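-- pv_equiv track=rewrite | github.com/epayet/advent-of-code | advent/twentytwentyfive/day3.py | get_max_digit
-- ===== SOURCE A (Python) =====
-- def get_max_digit(bank, start, max_length) -> tuple[int, int]:
--     max_digit_location = start
--     max_digit = 0
--     end = len(bank) - max_length + 1
--     for i, digit in enumerate(bank[start:end]):
--         int_digit = int(digit)
--         if int_digit > max_digit:
--             max_digit = int_digit
--             max_digit_location = start + i
--     return max_digit_location, max_digit
-- ===== SOURCE B (Python) =====
-- def get_max_digit(bank, start, max_length) -> tuple[int, int]:
--     end = len(bank) - max_length + 1
--     ranked = sorted((-int(d), i) for i, d in enumerate(bank[start:end]))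
--     if not ranked or ranked[0][0] >= 0:
--         return start, 0
--     neg, i = ranked[0]
--     return start + i, -neg
-- ===== Notes on version B (the rewrite author's own statement) =====
-- stated objective: alternative
-- what changed: Replaces A's single running-max-with-index scan by a sort-based selection: build (-digit, index) pairs for the slice and sort them lexicographically, so the first element of the sorted list is the leftmost maximum; the manual accumulator loop disappears.
import Mathlib
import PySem

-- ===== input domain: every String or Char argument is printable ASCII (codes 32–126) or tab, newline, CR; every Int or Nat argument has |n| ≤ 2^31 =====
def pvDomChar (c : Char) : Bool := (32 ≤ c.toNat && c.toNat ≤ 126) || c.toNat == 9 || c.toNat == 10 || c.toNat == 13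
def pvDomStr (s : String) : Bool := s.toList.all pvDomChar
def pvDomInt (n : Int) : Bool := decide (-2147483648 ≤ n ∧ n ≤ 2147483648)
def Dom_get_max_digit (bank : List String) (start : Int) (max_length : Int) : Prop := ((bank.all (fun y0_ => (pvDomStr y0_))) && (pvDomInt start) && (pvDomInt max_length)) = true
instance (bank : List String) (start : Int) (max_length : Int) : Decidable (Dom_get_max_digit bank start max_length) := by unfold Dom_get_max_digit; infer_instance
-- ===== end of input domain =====

-- B replaces A's running-max accumulator loop by sort-based selection: sort (-digit, index)
-- pairs lexicographically and take the first; alternative algorithm, not faster (O(n log n)).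

-- ===== PORT A =====
-- int(digit); Pre_ guarantees the parse succeeds, so the getD default is never used
def pvParse (d : String) : Int := (PySem.Int.ofStr? d).getD 0

-- loop body of A: 'if int_digit > max_digit: update both accumulators'
def pvStepA (start : Int) (st : Int × Int) (p : Int × String) : Int × Int :=
  let int_digit := pvParse p.2
  if st.2 < int_digit then (start + p.1, int_digit) else st

def get_max_digit (bank : List String) (start : Int) (max_length : Int) : Int × Int :=
  let e : Int := (bank.length : Int) - max_length + 1
  (PySem.List.enumerate (PySem.List.slice bank (some start) (some e)) 0).foldl
    (pvStepA start) (start, 0)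

-- ===== PORT B =====
def get_max_digit_alt (bank : List String) (start : Int) (max_length : Int) : Int × Int :=
  let e : Int := (bank.length : Int) - max_length + 1
  let ranked := PySem.List.sorted2
    ((PySem.List.enumerate (PySem.List.slice bank (some start) (some e)) 0).map
      (fun p => (-(pvParse p.2), p.1)))
    (fun q => q.1) (fun q => q.2)
  match ranked with
  | [] => (start, 0)
  | (neg, i) :: _ => if 0 ≤ neg then (start, 0) else (start + i, -neg)

-- ===== PRECONDITION & SPEC =====
-- Pre_ excludes exactly the inputs on which A raises ValueError: some string in the
-- scanned slice bank[start:end] is not int()-parseable (B raises there too).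
def Pre_get_max_digit (bank : List String) (start : Int) (max_length : Int) : Prop :=
  ∀ d ∈ PySem.List.slice bank (some start) (some ((bank.length : Int) - max_length + 1)),
    (PySem.Int.ofStr? d).isSome = true
instance (bank : List String) (start : Int) (max_length : Int) : Decidable (Pre_get_max_digit bank start max_length) := by unfold Pre_get_max_digit; infer_instance

def pvWitness_get_max_digit : List String × Int × Int := (["3", "1", "2"], 0, 1)

def Spec_get_max_digit (bank : List String) (start : Int) (max_length : Int) (out : Int × Int) : Prop := out = get_max_digit_alt bank start max_length
instance (bank : List String) (start : Int) (max_length : Int) (out : Int × Int) : Decidable (Spec_get_max_digit bank start max_length out) := by unfold Spec_get_max_digit; infer_instance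

-- ===== CLAIM (what is proved, stated in full; the proofs are below) =====
def Claim_equal_get_max_digit : Prop := ∀ (bank : List String) (start : Int) (max_length : Int), Dom_get_max_digit bank start max_length → Pre_get_max_digit bank start max_length → Spec_get_max_digit bank start max_length (get_max_digit bank start max_length)

-- ===== LEMMAS AND PROOFS =====

-- A's loop body on an already-parsed (index, digit) pair
def pvStepI (start : Int) (st : Int × Int) (p : Int × Int) : Int × Int :=
  if st.2 < p.2 then (start + p.1, p.2) else st

lemma pvEnum_map (f : String → Int) (xs : List String) (k : Int) :
    PySem.List.enumerate (xs.map f) k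
      = (PySem.List.enumerate xs k).map (fun p => (p.1, f p.2)) := by
  induction xs generalizing k with
  | nil => simp [PySem.List.enumerate_nil]
  | cons x t ih => simp [PySem.List.enumerate_cons, ih]

lemma pvFold_eq (start : Int) (xs : List String) :
    (PySem.List.enumerate xs 0).foldl (pvStepA start) (start, 0)
      = (PySem.List.enumerate (xs.map pvParse) 0).foldl (pvStepI start) (start, 0) := by
  rw [pvEnum_map, List.foldl_map]
  rfl

lemma pvFoldl_max_max (t : List Int) (a b : Int) :
    t.foldl max (max a b) = max a (t.foldl max b) := by
  induction t generalizing b with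
  | nil => simp
  | cons c t ih => simp only [List.foldl_cons, max_assoc, ih]

-- characterisation of A's running-max scan over an enumerated digit list
lemma pvScan_char (ds : List Int) : ∀ (start k loc0 md0 : Int),
    (PySem.List.enumerate ds k).foldl (pvStepI start) (loc0, md0)
      = match PySem.List.max? ds (fun y => y) with
        | none => (loc0, md0)
        | some m =>
          if md0 < m then (start + k + (((PySem.List.index? ds m).getD 0 : Nat) : Int), m)
          else (loc0, md0) := by
  induction ds with
  | nil => intro start k loc0 md0; simp [PySem.List.enumerate_nil, PySem.List.max?]
  | cons d t ih =>
    intro start k loc0 md0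
    rw [PySem.List.enumerate_cons]
    simp only [List.foldl_cons, PySem.List.max?_id_cons]
    try dsimp only
    by_cases hlt : md0 < d
    · -- update fires: accumulator becomes (start + k, d)
      rw [show pvStepI start (loc0, md0) (k, d) = (start + k, d) by
        simp [pvStepI, hlt]]
      rw [ih start (k + 1) (start + k) d]
      cases ht : PySem.List.max? t (fun y => y) with
      | none =>
        have : t = [] := (PySem.List.max?_eq_none_iff t _).mp ht
        subst this
        try dsimp only
        rw [List.foldl_nil, if_pos hlt, PySem.List.index?_cons_self]
        simp
      | some m' =>
        obtain ⟨d', t', rfl⟩ : ∃ d' t', t = d' :: t' := by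
          cases t with
          | nil => simp [PySem.List.max?] at ht
          | cons a b => exact ⟨a, b, rfl⟩
        dsimp only
        rw [PySem.List.max?_id_cons] at ht
        have hm' : m' = t'.foldl max d' := by simpa using ht.symm
        rw [List.foldl_cons, pvFoldl_max_max, ← hm']
        by_cases hdm : d < m'
        · have hne : d ≠ m' := by omega
          rw [max_eq_right (le_of_lt hdm), if_pos hdm, if_pos (by omega : md0 < m'),
            PySem.List.index?_cons_of_ne _ hne]
          have hmem : m' ∈ d' :: t' := PySem.List.max?_mem
            (by rw [PySem.List.max?_id_cons]; exact ht)
          obtain ⟨j, hj⟩ := Option.isSome_iff_exists.mp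
            ((PySem.List.index?_isSome_iff _ _).mpr hmem)
          rw [hj]
          simp only [Option.map_some, Option.getD_some, Prod.ext_iff]
          constructor
          · push_cast; omega
          · trivial
        · rw [max_eq_left (by omega : m' ≤ d), if_neg hdm, if_pos hlt,
            PySem.List.index?_cons_self]
          simp
    · -- no update: accumulator unchanged
      rw [show pvStepI start (loc0, md0) (k, d) = (loc0, md0) by
        simp [pvStepI, hlt]]
      rw [ih start (k + 1) loc0 md0]
      cases ht : PySem.List.max? t (fun y => y) with
      | none =>
        have : t = [] := (PySem.List.max?_eq_none_iff t _).mp ht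
        subst this
        try dsimp only
        rw [List.foldl_nil, if_neg hlt]
      | some m' =>
        obtain ⟨d', t', rfl⟩ : ∃ d' t', t = d' :: t' := by
          cases t with
          | nil => simp [PySem.List.max?] at ht
          | cons a b => exact ⟨a, b, rfl⟩
        dsimp only
        rw [PySem.List.max?_id_cons] at ht
        have hm' : m' = t'.foldl max d' := by simpa using ht.symm
        rw [List.foldl_cons, pvFoldl_max_max, ← hm']
        by_cases hm : md0 < m'
        · have hdm : d < m' := by omega
          have hne : d ≠ m' := by omega
          rw [max_eq_right (le_of_lt hdm), if_pos hm, if_pos hm,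
            PySem.List.index?_cons_of_ne _ hne]
          have hmem : m' ∈ d' :: t' := PySem.List.max?_mem
            (by rw [PySem.List.max?_id_cons]; exact ht)
          obtain ⟨j, hj⟩ := Option.isSome_iff_exists.mp
            ((PySem.List.index?_isSome_iff _ _).mpr hmem)
          rw [hj]
          simp only [Option.map_some, Option.getD_some, Prod.ext_iff]
          constructor
          · push_cast; omega
          · trivial
        · rw [if_neg hm]
          by_cases hmd : m' ≤ d
          · rw [max_eq_left hmd, if_neg hlt]
          · rw [max_eq_right (by omega : d ≤ m'), if_neg hm]

-- ----- B-side: the head of the lexicographic insertion sort is the minimum -----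

-- Python's lexicographic '<' on the (neg, index) pairs, as sorted2 compares them
def pvLt (a b : Int × Int) : Bool :=
  decide (a.1 < b.1) || (!decide (b.1 < a.1) && decide (a.2 < b.2))

lemma pvLt_eq_false_iff (a b : Int × Int) :
    pvLt a b = false ↔ (b.1 ≤ a.1 ∧ (b.1 < a.1 ∨ b.2 ≤ a.2)) := by
  simp [pvLt]; omega

lemma pvLt_irrefl (a : Int × Int) : pvLt a a = false := by simp [pvLt]

lemma pvLt_asymm {a b : Int × Int} (h : pvLt a b = true) : pvLt b a = false := by
  simp only [pvLt, Bool.or_eq_true, Bool.and_eq_true, Bool.not_eq_true', decide_eq_true_eq,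
    decide_eq_false_iff_not] at h
  rw [pvLt_eq_false_iff]; omega

lemma pvLt_trans {a b c : Int × Int} (h1 : pvLt a b = true) (h2 : pvLt b c = true) :
    pvLt a c = true := by
  simp only [pvLt, Bool.or_eq_true, Bool.and_eq_true, Bool.not_eq_true', decide_eq_true_eq,
    decide_eq_false_iff_not] at *
  omega

lemma pvInsertBy_cons (before : (Int × Int) → (Int × Int) → Bool) (x a : Int × Int)
    (t : List (Int × Int)) :
    PySem.List.insertBy before x (a :: t)
      = if before x a then x :: a :: t else a :: PySem.List.insertBy before x t := rfl

-- the head of the accumulator is minimal under pvLt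
def pvMinHead (l : List (Int × Int)) : Prop :=
  ∀ p ∈ l.head?, ∀ y ∈ l, pvLt y p = false

lemma pvInsert_minhead (x : Int × Int) (l : List (Int × Int)) (h : pvMinHead l) :
    pvMinHead (PySem.List.insertBy pvLt x l) := by
  cases l with
  | nil =>
    intro p hp y hy
    simp only [show PySem.List.insertBy pvLt x [] = [x] from rfl] at hp hy
    simp only [List.head?_cons, Option.mem_some_iff] at hp
    simp only [List.mem_singleton] at hy
    subst hp; subst hy; exact pvLt_irrefl _
  | cons a t =>
    rw [pvInsertBy_cons]
    by_cases hb : pvLt x a = true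
    · rw [if_pos hb]
      intro p hp y hy
      simp only [List.head?_cons, Option.mem_some_iff] at hp
      subst hp
      rcases List.mem_cons.mp hy with rfl | hy'
      · exact pvLt_irrefl y
      · rcases List.mem_cons.mp hy' with rfl | hyt
        · exact pvLt_asymm hb
        · cases hv : pvLt y x with
          | false => rfl
          | true =>
            have hya : pvLt y a = true := pvLt_trans hv hb
            have hfa : pvLt y a = false := h a (by simp) y (by simp [hyt])
            simp_all
    · rw [if_neg hb]
      intro p hp y hy
      simp only [List.head?_cons, Option.mem_some_iff] at hp
      subst hp
      rcases List.mem_cons.mp hy with rfl | hy'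
      · exact pvLt_irrefl y
      · rcases (PySem.List.insertBy_mem_iff _ _ _ _).mp hy' with rfl | hyt
        · simpa using hb
        · exact h a (by simp) y (by simp [hyt])

lemma pvFold_minhead (xs : List (Int × Int)) : ∀ acc, pvMinHead acc →
    pvMinHead (xs.foldl (fun acc x => PySem.List.insertBy pvLt x acc) acc) := by
  induction xs with
  | nil => intro acc h; exact h
  | cons x t ih => intro acc h; exact ih _ (pvInsert_minhead x acc h)

-- the head of sorted2 (lex on (·.1, ·.2)) is a member minimal under pvLt
lemma pvSorted2_head_min (ps : List (Int × Int)) (p : Int × Int) (rest : List (Int × Int))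
    (h : PySem.List.sorted2 ps (fun q => q.1) (fun q => q.2) = p :: rest) :
    p ∈ ps ∧ ∀ y ∈ ps, pvLt y p = false := by
  have hperm : (PySem.List.sorted2 ps (fun q => q.1) (fun q => q.2)).Perm ps :=
    PySem.List.sorted2_perm ps _ _ false
  have hmin : pvMinHead (ps.foldl (fun acc x => PySem.List.insertBy pvLt x acc) []) :=
    pvFold_minhead ps [] (by intro q hq; simp at hq)
  have hfold : PySem.List.sorted2 ps (fun q => q.1) (fun q => q.2)
      = ps.foldl (fun acc x => PySem.List.insertBy pvLt x acc) [] := rfl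
  rw [← hfold, h] at hmin
  refine ⟨hperm.mem_iff.mp (by rw [h]; simp), ?_⟩
  intro y hy
  have hmem : y ∈ p :: rest := by rw [← h]; exact hperm.mem_iff.mpr hy
  exact hmin p (by simp) y hmem

-- membership in the (neg, index) pair list B sorts
lemma pvPs_mem_iff (xs : List String) (q : Int × Int) :
    q ∈ List.map (fun p => (-pvParse p.2, p.1)) (PySem.List.enumerate xs)
      ↔ ∃ (k : Nat) (_ : k < xs.length), q = (-pvParse xs[k], (k : Int)) := by
  simp only [List.mem_map, PySem.List.mem_enumerate_iff]
  constructor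
  · rintro ⟨a, ⟨k, hk, rfl⟩, rfl⟩; exact ⟨k, hk, by simp⟩
  · rintro ⟨k, hk, rfl⟩; exact ⟨(0 + (k : Int), xs[k]), ⟨k, hk, rfl⟩, by simp⟩

-- the two characterisations coincide: max?/index? picture vs sorted2-head picture
lemma pvMain (start : Int) (xs : List String) :
    (match PySem.List.max? (List.map pvParse xs) fun y => y with
      | none => (start, 0)
      | some m =>
        if 0 < m then (start + 0 + (((PySem.List.index? (List.map pvParse xs) m).getD 0 : Nat) : Int), m)
        else (start, 0)) =
    (match PySem.List.sorted2 (List.map (fun p => (-pvParse p.2, p.1)) (PySem.List.enumerate xs))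
        (fun q => q.1) (fun q => q.2) with
      | [] => (start, 0)
      | (neg, i) :: _ => if 0 ≤ neg then (start, 0) else (start + i, -neg)) := by
  cases xs with
  | nil => rfl
  | cons x t =>
    set ds := List.map pvParse (x :: t) with hds
    set ps := List.map (fun p => (-pvParse p.2, p.1)) (PySem.List.enumerate (x :: t)) with hps
    set M := (List.map pvParse t).foldl max (pvParse x) with hMdef
    have hMmax : PySem.List.max? ds (fun y => y) = some M := by
      rw [show ds = pvParse x :: List.map pvParse t from rfl, PySem.List.max?_id_cons]
    have hub : ∀ y ∈ ds, y ≤ M := fun y hy => PySem.List.max?_isMax hMmax y hy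
    have hMmem : M ∈ ds := PySem.List.max?_mem hMmax
    have hdsget : ∀ (j : Nat) (hj : j < (x :: t).length),
        ds[j]'(by simpa [hds] using hj) = pvParse ((x :: t)[j]) := by
      intro j hj; simp only [hds, List.getElem_map]
    cases hs : PySem.List.sorted2 ps (fun q => q.1) (fun q => q.2) with
    | nil =>
      exfalso
      have hperm := PySem.List.sorted2_perm ps (fun q => q.1) (fun q => q.2) false
      rw [hs] at hperm
      have hnil := hperm.symm.eq_nil
      simp [hps, PySem.List.enumerate_cons] at hnil
    | cons p rest =>
      obtain ⟨hpmem, hmin⟩ := pvSorted2_head_min ps p rest hs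
      rw [hps, pvPs_mem_iff] at hpmem
      obtain ⟨k, hk, hpq⟩ := hpmem
      have hmin' : ∀ (j : Nat) (hj : j < (x :: t).length),
          pvParse ((x :: t)[j]) ≤ pvParse ((x :: t)[k]) ∧
            (pvParse ((x :: t)[j]) < pvParse ((x :: t)[k]) ∨ (k : Int) ≤ (j : Int)) := by
        intro j hj
        have hy : (-pvParse ((x :: t)[j]), (j : Int)) ∈ ps := by
          rw [hps, pvPs_mem_iff]; exact ⟨j, hj, rfl⟩
        have hlt := hmin _ hy
        rw [hpq, pvLt_eq_false_iff] at hlt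
        simp only at hlt
        omega
      have hkM : pvParse ((x :: t)[k]) = M := by
        have h1 : pvParse ((x :: t)[k]) ≤ M := by
          have hm : ds[k]'(by simpa [hds] using hk) ∈ ds := List.getElem_mem _
          have := hub _ hm
          rwa [hdsget k hk] at this
        have h2 : M ≤ pvParse ((x :: t)[k]) := by
          obtain ⟨jM, hjM, hje⟩ := List.getElem_of_mem hMmem
          have hjM' : jM < (x :: t).length := by simpa [hds] using hjM
          have hjv : pvParse ((x :: t)[jM]) = M := by rw [← hdsget jM hjM']; exact hje
          have := (hmin' jM hjM').1
          omega
        omega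
      have hidx : PySem.List.index? ds M = some k := by
        have hsome : (PySem.List.index? ds M).isSome :=
          (PySem.List.index?_isSome_iff _ _).mpr hMmem
        obtain ⟨k0, hk0⟩ := Option.isSome_iff_exists.mp hsome
        obtain ⟨hk0lt, hk0v, hk0min⟩ := PySem.List.getElem_of_index?_eq_some hk0
        have hk0lt' : k0 < (x :: t).length := by simpa [hds] using hk0lt
        have hle1 : k0 ≤ k := by
          by_contra hgt
          exact hk0min k (by omega) (by rw [hdsget k hk, hkM])
        have hle2 : k ≤ k0 := by
          have hmk0 := hmin' k0 hk0lt'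
          have hdk0 : pvParse ((x :: t)[k0]) = M := by rw [← hdsget k0 hk0lt']; exact hk0v
          omega
        have : k0 = k := by omega
        rw [← this]; exact hk0
      rw [hMmax, hpq]
      dsimp only
      rw [hidx, hkM]
      by_cases h0 : 0 < M
      · rw [if_pos h0, if_neg (by omega : ¬ (0 : Int) ≤ -M)]
        congr 1
        · simp
        · simp
      · rw [if_neg h0, if_pos (by omega : (0 : Int) ≤ -M)]

-- ===== VERDICT (by name: the statement is the Claim_ definition above) =====
theorem get_max_digit_spec : Claim_equal_get_max_digit := by
  intro bank start max_length _hdom _hpre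
  unfold Spec_get_max_digit get_max_digit get_max_digit_alt
  dsimp only
  generalize PySem.List.slice bank (some start)
      (some ((bank.length : Int) - max_length + 1)) = xs
  rw [pvFold_eq, pvScan_char (xs.map pvParse) start 0 start 0]
  exact pvMain start xs
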